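-- pv_equiv track=rewrite | github.com/bryant273092/Python-Projects | ile1materials/Lab 7/46369/exam.py | talker_frequency
-- ===== SOURCE A (Python) =====
-- def talker_frequency (db : {str:{str:[int]}}) -> [(str,int)]:
--     freq_list = []
--     for caller in db.keys():
--         caller_freq = 0
--         for call,recei in db.items():
--             for receiver,time in recei.items():
--                 if caller == call:
--                     caller_freq += len(time)
--                 elif caller == receiver:
--                     caller_freq += len(time)
--         freq_list.append((caller,caller_freq))
--     return sorted(freq_list,key = lambda x:(-x[1],x[0]))
--
--     pass
-- ===== SOURCE B (Python) =====
-- def talker_frequency(db):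
--     # One pass over the database into a frequency table seeded with every key,
--     # instead of re-scanning the whole db once per person.
--     freq = {k: 0 for k in db}
--     for caller, calls in db.items():
--         for receiver, times in calls.items():
--             freq[caller] += len(times)
--             if receiver != caller and receiver in freq:
--                 freq[receiver] += len(times)
--     return sorted(freq.items(), key=lambda x: (-x[1], x[0]))
-- ===== Notes on version B (the rewrite author's own statement) =====
-- stated objective: faster
-- what changed: Replaces A's per-person re-scan of the entire db (for every key, a full nested pass over all entries) with a single forward pass that accumulates counts into one frequency table seeded with every key; Pre_ only excludes association lists with duplicate outer keys, which cannot arise from a Python dict argument.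
import Mathlib
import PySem

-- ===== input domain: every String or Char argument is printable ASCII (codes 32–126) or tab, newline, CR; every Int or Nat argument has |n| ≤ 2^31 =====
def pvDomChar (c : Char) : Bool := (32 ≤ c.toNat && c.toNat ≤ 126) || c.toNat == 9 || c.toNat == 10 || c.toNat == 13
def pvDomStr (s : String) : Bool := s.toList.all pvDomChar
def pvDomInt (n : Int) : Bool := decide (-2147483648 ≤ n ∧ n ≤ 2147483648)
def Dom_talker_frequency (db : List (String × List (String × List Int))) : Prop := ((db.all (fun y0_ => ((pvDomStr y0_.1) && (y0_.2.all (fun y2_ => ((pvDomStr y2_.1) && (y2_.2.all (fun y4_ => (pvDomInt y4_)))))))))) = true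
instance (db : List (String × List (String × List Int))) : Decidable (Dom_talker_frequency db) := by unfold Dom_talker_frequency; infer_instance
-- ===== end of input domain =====

-- B replaces A's per-person re-scan of the whole db with one forward pass into a
-- frequency table seeded with every key (faster: one pass instead of a pass per person).

-- ===== PORT A =====
def talker_frequency (db : List (String × List (String × List Int))) : List (String × Int) :=
  let freq_list : List (String × Int) :=
    (db.map (fun p => p.1)).foldl
      (fun acc caller =>
        let caller_freq : Int := db.foldl
          (fun cf p =>
            p.2.foldl
              (fun cf q =>
                if caller == p.1 then cf + (q.2.length : Int)
                else if caller == q.1 then cf + (q.2.length : Int)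
                else cf)
              cf)
          0
        acc ++ [(caller, caller_freq)])
      []
  PySem.List.sorted freq_list (fun x => toLex (-x.2, x.1)) false

-- ===== PORT B =====
def talker_frequency_alt (db : List (String × List (String × List Int))) : List (String × Int) :=
  let freq0 : PySem.Dict String Int :=
    db.foldl (fun d p => d.insert p.1 0) PySem.Dict.empty
  let freq : PySem.Dict String Int :=
    db.foldl
      (fun d p =>
        p.2.foldl
          (fun d q =>
            let d1 := d.modify p.1 0 (· + (q.2.length : Int))
            if q.1 != p.1 && d1.contains q.1 then d1.modify q.1 0 (· + (q.2.length : Int))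
            else d1)
          d)
      freq0
  PySem.List.sorted freq.items (fun x => toLex (-x.2, x.1)) false

-- ===== PRECONDITION & SPEC =====
-- Pre_ excludes association lists with duplicate outer keys; the argument is a Python dict,
-- whose keys are necessarily distinct, so no Python input is excluded.
def Pre_talker_frequency (db : List (String × List (String × List Int))) : Prop :=
  (db.map (fun p => p.1)).Nodup
instance (db : List (String × List (String × List Int))) : Decidable (Pre_talker_frequency db) := by unfold Pre_talker_frequency; infer_instance
def pvWitness_talker_frequency : (List (String × List (String × List Int))) :=
  [("a", [("b", [1, 2])]), ("b", [])]
def Spec_talker_frequency (db : List (String × List (String × List Int))) (out : List (String × Int)) : Prop := out = talker_frequency_alt db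
instance (db : List (String × List (String × List Int))) (out : List (String × Int)) : Decidable (Spec_talker_frequency db out) := by unfold Spec_talker_frequency; infer_instance

-- ===== CLAIM (what is proved, stated in full; the proofs are below) =====
def Claim_equal_talker_frequency : Prop := ∀ (db : List (String × List (String × List Int))), Dom_talker_frequency db → Pre_talker_frequency db → Spec_talker_frequency db (talker_frequency db)

-- ===== LEMMAS AND PROOFS =====

-- every value in the seed dict {k: 0 for k in db} is 0
lemma pv_getD_seed (db : List (String × List (String × List Int)))
    (d : PySem.Dict String Int) (h0 : ∀ k, d.getD k 0 = 0) (k : String) :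
    (db.foldl (fun d p => d.insert p.1 0) d).getD k 0 = 0 := by
  induction db generalizing d with
  | nil => exact h0 k
  | cons p rest ih =>
      refine ih _ (fun k' => ?_)
      rw [PySem.Dict.getD_insert]
      split <;> simp [h0]

-- one inner step of B preserves the key list, provided the caller is already a key
lemma pv_step_keys (caller : String) (q : String × List Int) (d : PySem.Dict String Int)
    (hc : caller ∈ d.keys) :
    (let d1 := d.modify caller 0 (· + (q.2.length : Int))
     if q.1 != caller && d1.contains q.1 then d1.modify q.1 0 (· + (q.2.length : Int))
     else d1).keys = d.keys := by
  have hcc : d.contains caller = true := (PySem.Dict.contains_iff_mem_keys d caller).mpr hc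
  have hk1 : (d.modify caller 0 (· + (q.2.length : Int))).keys = d.keys := by
    rw [PySem.Dict.keys_modify, PySem.Dict.keys_insert_of_contains _ _ hcc]
  simp only []
  split
  · next h =>
      have hcq : (d.modify caller 0 (· + (q.2.length : Int))).contains q.1 = true := by
        rw [Bool.and_eq_true] at h; exact h.2
      rw [PySem.Dict.keys_modify, PySem.Dict.keys_insert_of_contains _ _ hcq, hk1]
  · exact hk1

lemma pv_step_getD (caller : String) (q : String × List Int) (d : PySem.Dict String Int)
    (k : String) (hk : k ∈ d.keys) :
    (let d1 := d.modify caller 0 (· + (q.2.length : Int))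
     if q.1 != caller && d1.contains q.1 then d1.modify q.1 0 (· + (q.2.length : Int))
     else d1).getD k 0
    = (if k == caller then d.getD k 0 + (q.2.length : Int)
       else if k == q.1 then d.getD k 0 + (q.2.length : Int)
       else d.getD k 0) := by
  have hck : d.contains k = true := (PySem.Dict.contains_iff_mem_keys d k).mpr hk
  simp only [PySem.Dict.contains_modify]
  by_cases hkc : k = caller <;> by_cases hkq : k = q.1 <;>
    split <;> simp_all [PySem.Dict.getD_modify]

-- the inner fold of B over one person's calls, versus A's inner fold
lemma pv_inner (caller : String) (calls : List (String × List Int))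
    (d : PySem.Dict String Int) (hc : caller ∈ d.keys) :
    (calls.foldl
        (fun d q =>
          let d1 := d.modify caller 0 (· + (q.2.length : Int))
          if q.1 != caller && d1.contains q.1 then d1.modify q.1 0 (· + (q.2.length : Int))
          else d1)
        d).keys = d.keys
    ∧ ∀ k, k ∈ d.keys →
      (calls.foldl
        (fun d q =>
          let d1 := d.modify caller 0 (· + (q.2.length : Int))
          if q.1 != caller && d1.contains q.1 then d1.modify q.1 0 (· + (q.2.length : Int))
          else d1)
        d).getD k 0
      = calls.foldl
          (fun cf q =>
            if k == caller then cf + (q.2.length : Int)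
            else if k == q.1 then cf + (q.2.length : Int)
            else cf)
          (d.getD k 0) := by
  induction calls generalizing d with
  | nil => exact ⟨rfl, fun k hk => rfl⟩
  | cons q rest ih =>
      simp only [List.foldl_cons]
      have hsk := pv_step_keys caller q d hc
      simp only [] at hsk
      have hc' : caller ∈ (if q.1 != caller && (d.modify caller 0 (· + (q.2.length : Int))).contains q.1 then
          (d.modify caller 0 (· + (q.2.length : Int))).modify q.1 0 (· + (q.2.length : Int))
        else d.modify caller 0 (· + (q.2.length : Int))).keys := by rw [hsk]; exact hc
      obtain ⟨ihk, ihg⟩ := ih _ hc'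
      refine ⟨by rw [ihk, hsk], fun k hk => ?_⟩
      have hk' : k ∈ (if q.1 != caller && (d.modify caller 0 (· + (q.2.length : Int))).contains q.1 then
          (d.modify caller 0 (· + (q.2.length : Int))).modify q.1 0 (· + (q.2.length : Int))
        else d.modify caller 0 (· + (q.2.length : Int))).keys := by rw [hsk]; exact hk
      rw [ihg k hk']
      have hsg := pv_step_getD caller q d k hk
      simp only [] at hsg
      rw [hsg]

-- the outer fold of B versus A's outer fold
lemma pv_outer (es : List (String × List (String × List Int)))
    (d : PySem.Dict String Int) (hes : ∀ p ∈ es, p.1 ∈ d.keys) :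
    (es.foldl
        (fun d p =>
          p.2.foldl
            (fun d q =>
              let d1 := d.modify p.1 0 (· + (q.2.length : Int))
              if q.1 != p.1 && d1.contains q.1 then d1.modify q.1 0 (· + (q.2.length : Int))
              else d1)
            d)
        d).keys = d.keys
    ∧ ∀ k, k ∈ d.keys →
      (es.foldl
        (fun d p =>
          p.2.foldl
            (fun d q =>
              let d1 := d.modify p.1 0 (· + (q.2.length : Int))
              if q.1 != p.1 && d1.contains q.1 then d1.modify q.1 0 (· + (q.2.length : Int))
              else d1)
            d)
        d).getD k 0
      = es.foldl
          (fun cf p =>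
            p.2.foldl
              (fun cf q =>
                if k == p.1 then cf + (q.2.length : Int)
                else if k == q.1 then cf + (q.2.length : Int)
                else cf)
              cf)
          (d.getD k 0) := by
  induction es generalizing d with
  | nil => exact ⟨rfl, fun k hk => rfl⟩
  | cons p rest ih =>
      simp only [List.foldl_cons]
      have hp : p.1 ∈ d.keys := hes p (List.mem_cons_self ..)
      obtain ⟨hik, hig⟩ := pv_inner p.1 p.2 d hp
      have hes' : ∀ r ∈ rest, r.1 ∈ (p.2.foldl
          (fun d q =>
            let d1 := d.modify p.1 0 (· + (q.2.length : Int))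
            if q.1 != p.1 && d1.contains q.1 then d1.modify q.1 0 (· + (q.2.length : Int))
            else d1) d).keys := by
        intro r hr; rw [hik]; exact hes r (List.mem_cons_of_mem _ hr)
      obtain ⟨ohk, ohg⟩ := ih _ hes'
      refine ⟨by rw [ohk, hik], fun k hk => ?_⟩
      have hk' : k ∈ (p.2.foldl
          (fun d q =>
            let d1 := d.modify p.1 0 (· + (q.2.length : Int))
            if q.1 != p.1 && d1.contains q.1 then d1.modify q.1 0 (· + (q.2.length : Int))
            else d1) d).keys := by rw [hik]; exact hk
      rw [ohg k hk', hig k hk]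

-- ===== VERDICT (by name: the statement is the Claim_ definition above) =====
theorem talker_frequency_spec : Claim_equal_talker_frequency := by
  intro db _ hpre
  unfold Spec_talker_frequency
  unfold talker_frequency talker_frequency_alt
  simp only []
  congr 1
  have hseed0 : ∀ k, (db.foldl (fun d p => d.insert p.1 0) (PySem.Dict.empty : PySem.Dict String Int)).getD k 0 = 0 :=
    pv_getD_seed db PySem.Dict.empty (fun k => by simp [PySem.Dict.getD_empty])
  have hkeys0 : (db.foldl (fun d p => d.insert p.1 0) (PySem.Dict.empty : PySem.Dict String Int)).keys
      = db.map (fun p => p.1) := by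
    rw [PySem.Dict.keys_foldl_insert_key db (fun p => p.1) (fun _ _ => 0) PySem.Dict.empty]
    rw [PySem.Dict.keys_empty, PySem.Set.update_nil_left,
      PySem.Set.ofList_eq_self_of_nodup _ hpre]
  have hes : ∀ p ∈ db, p.1 ∈ (db.foldl (fun d p => d.insert p.1 0) (PySem.Dict.empty : PySem.Dict String Int)).keys := by
    intro p hp; rw [hkeys0]; exact List.mem_map_of_mem hp
  obtain ⟨hfk, hfg⟩ := pv_outer db _ hes
  have hfkeys : (db.foldl
      (fun d p =>
        p.2.foldl
          (fun d q =>
            let d1 := d.modify p.1 0 (· + (q.2.length : Int))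
            if q.1 != p.1 && d1.contains q.1 then d1.modify q.1 0 (· + (q.2.length : Int))
            else d1) d)
      (db.foldl (fun d p => d.insert p.1 0) (PySem.Dict.empty : PySem.Dict String Int))).keys
      = db.map (fun p => p.1) := by rw [hfk, hkeys0]
  rw [PySem.Dict.items_eq_map_keys _ (by rw [hfkeys]; exact hpre) 0, hfkeys]
  rw [PySem.List.foldl_append_singleton_eq_map
    (fun caller => (caller, db.foldl
      (fun cf p =>
        p.2.foldl
          (fun cf q =>
            if caller == p.1 then cf + (q.2.length : Int)
            else if caller == q.1 then cf + (q.2.length : Int)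
            else cf) cf) 0)) (db.map (fun p => p.1)) []]
  simp only [List.nil_append]
  apply List.map_congr_left
  intro k hkL
  have hk : k ∈ (db.foldl (fun d p => d.insert p.1 0) (PySem.Dict.empty : PySem.Dict String Int)).keys := by
    rw [hkeys0]; exact hkL
  rw [hfg k hk, hseed0 k]
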